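-- pv_equiv track=rewrite | github.com/IorenzoLF/Le_Refuge | Le_refuge/tools/maintenance/optimiseur_temples_dominants.py | _creer_connexions_aelya_internes
-- ===== SOURCE A (Python) =====
-- def _creer_connexions_aelya_internes(groupes):
--     connexions = []
--     for i, (groupe1, elements1) in enumerate(groupes.items()):
--         for j, (groupe2, elements2) in enumerate(groupes.items()):
--             if i < j and elements1 and elements2:
--                 connexions.append({
--                     "source": groupe1,
--                     "cible": groupe2,
--                     "type": "optimisation_aelya",
--                     "force": "forte"
--                 })
--     return connexions
-- ===== SOURCE B (Python) =====
-- def _creer_connexions_aelya_internes(groupes):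
--     # pre-filter the non-empty group names once, then pair each with the names after it
--     rest = [nom for nom, elements in groupes.items() if elements]
--     connexions = []
--     while rest:
--         source = rest[0]
--         rest = rest[1:]
--         for cible in rest:
--             connexions.append({
--                 "source": source,
--                 "cible": cible,
--                 "type": "optimisation_aelya",
--                 "force": "forte"
--             })
--     return connexions
-- ===== Notes on version B (the rewrite author's own statement) =====
-- stated objective: simpler
-- what changed: B first filters the non-empty group names into one list, then walks its tails pairing each head with every later name, so the emptiness tests and the index comparison i<j disappear from the pairing loop.
import Mathlib
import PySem

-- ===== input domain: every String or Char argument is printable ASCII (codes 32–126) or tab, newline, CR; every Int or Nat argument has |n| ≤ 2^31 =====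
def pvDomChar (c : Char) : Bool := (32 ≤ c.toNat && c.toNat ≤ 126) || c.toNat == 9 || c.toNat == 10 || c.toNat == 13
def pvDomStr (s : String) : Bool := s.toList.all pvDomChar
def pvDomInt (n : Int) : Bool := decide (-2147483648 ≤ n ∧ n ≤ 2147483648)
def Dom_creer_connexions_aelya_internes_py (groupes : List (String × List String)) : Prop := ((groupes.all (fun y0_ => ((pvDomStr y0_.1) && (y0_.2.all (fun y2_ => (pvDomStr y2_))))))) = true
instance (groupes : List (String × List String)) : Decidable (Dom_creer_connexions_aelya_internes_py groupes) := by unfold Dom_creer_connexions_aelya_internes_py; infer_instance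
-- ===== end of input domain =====

-- B pre-filters the non-empty group names once and pairs each with the names after it (simpler: no emptiness tests or index comparison in the pairing loop).


-- the connection dict both programs append (insertion order of its keys)
def pvConn (source cible : String) : List (String × String) :=
  [("source", source), ("cible", cible), ("type", "optimisation_aelya"), ("force", "forte")]

-- ===== PORT A =====
def creer_connexions_aelya_internes_py (groupes : List (String × List String)) : List (List (String × String)) :=
  (PySem.List.enumerate groupes 0).foldl (fun connexions p =>
    (PySem.List.enumerate groupes 0).foldl (fun connexions q =>
      if p.1 < q.1 ∧ p.2.2 ≠ [] ∧ q.2.2 ≠ [] then connexions ++ [pvConn p.2.1 q.2.1]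
      else connexions) connexions) []

-- ===== PORT B =====
-- the while loop of Source B: peel the head of `rest`, pair it with every later name
def pvPairs : List String → List (List (String × String))
  | [] => []
  | source :: rest => rest.map (fun cible => pvConn source cible) ++ pvPairs rest

def creer_connexions_aelya_internes_py_alt (groupes : List (String × List String)) : List (List (String × String)) :=
  pvPairs ((groupes.filter (fun p => p.2 ≠ [])).map Prod.fst)

-- ===== PRECONDITION & SPEC =====
def Spec_creer_connexions_aelya_internes_py (groupes : List (String × List String)) (out : List (List (String × String))) : Prop := out = creer_connexions_aelya_internes_py_alt groupes
instance (groupes : List (String × List String)) (out : List (List (String × String))) : Decidable (Spec_creer_connexions_aelya_internes_py groupes out) := by unfold Spec_creer_connexions_aelya_internes_py; infer_instance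

-- ===== CLAIM (what is proved, stated in full; the proofs are below) =====
def Claim_equal_creer_connexions_aelya_internes_py : Prop := ∀ (groupes : List (String × List String)), Dom_creer_connexions_aelya_internes_py groupes → Spec_creer_connexions_aelya_internes_py groupes (creer_connexions_aelya_internes_py groupes)

-- ===== LEMMAS AND PROOFS =====

-- indices of an enumeration that starts above i all pass the `i < index` test
lemma pv_filter_hi (i : Int) (e1 : List String) :
    ∀ (ys : List (String × List String)) (s : Int), i < s →
    (PySem.List.enumerate ys s).filter (fun q => decide (i < q.1 ∧ e1 ≠ [] ∧ q.2.2 ≠ []))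
      = (PySem.List.enumerate ys s).filter (fun q => decide (e1 ≠ [] ∧ q.2.2 ≠ [])) := by
  intro ys
  induction ys with
  | nil => intro s _; simp [PySem.List.enumerate_nil]
  | cons y ys ih =>
    intro s hs
    simp only [PySem.List.enumerate_cons, List.filter_cons]
    rw [ih (s + 1) (by omega)]
    by_cases h1 : e1 = [] <;> by_cases h2 : y.2 = [] <;> simp [h1, h2, hs]

-- filtering an enumeration by a value-only test and dropping the index = filtering the values
lemma pv_filter_map (e1 : List String) (he : e1 ≠ []) (g1 : String) :
    ∀ (ys : List (String × List String)) (s : Int),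
    ((PySem.List.enumerate ys s).filter (fun q => decide (e1 ≠ [] ∧ q.2.2 ≠ []))).map
        (fun q => pvConn g1 q.2.1)
      = (ys.filter (fun y => y.2 ≠ [])).map (fun y => pvConn g1 y.1) := by
  intro ys
  induction ys with
  | nil => intro s; simp [PySem.List.enumerate_nil]
  | cons y ys ih =>
    intro s
    simp only [PySem.List.enumerate_cons, List.filter_cons]
    by_cases h2 : y.2 = [] <;> simp [h2, he] <;> simpa [he] using ih (s + 1)

-- entries of an enumeration whose indices all lie at or below i fail the `i < index` test
lemma pv_filter_lo (i : Int) (e1 : List String) :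
    ∀ (ys : List (String × List String)) (s : Int), s + ys.length ≤ i + 1 →
    (PySem.List.enumerate ys s).filter (fun q => decide (i < q.1 ∧ e1 ≠ [] ∧ q.2.2 ≠ [])) = [] := by
  intro ys
  induction ys with
  | nil => intro s _; simp [PySem.List.enumerate_nil]
  | cons y ys ih =>
    intro s hs
    simp only [List.length_cons] at hs
    simp only [PySem.List.enumerate_cons, List.filter_cons]
    rw [ih (s + 1) (by push_cast at hs; omega)]
    have hys : (0 : Int) ≤ (ys.length : Int) := by positivity
    have : ¬ (i < s) := by omega
    simp [this]

-- main invariant: the outer flatMap over the enumerated suffix, filtering the full enumeration,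
-- produces exactly the tail-pairing of the non-empty names of the suffix
lemma pv_main : ∀ (suf pre : List (String × List String)),
    (PySem.List.enumerate suf (pre.length)).flatMap (fun p =>
      ((PySem.List.enumerate (pre ++ suf) 0).filter
        (fun q => decide (p.1 < q.1 ∧ p.2.2 ≠ [] ∧ q.2.2 ≠ []))).map
        (fun q => pvConn p.2.1 q.2.1))
      = pvPairs ((suf.filter (fun y => y.2 ≠ [])).map Prod.fst) := by
  intro suf
  induction suf with
  | nil => intro pre; simp [PySem.List.enumerate_nil, pvPairs]
  | cons x rest ih =>
    intro pre
    have hsplit : pre ++ x :: rest = (pre ++ [x]) ++ rest := by simp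
    simp only [PySem.List.enumerate_cons, List.flatMap_cons]
    have hfull : PySem.List.enumerate (pre ++ x :: rest) 0
        = PySem.List.enumerate (pre ++ [x]) 0 ++ PySem.List.enumerate rest ((pre ++ [x]).length) := by
      rw [hsplit, PySem.List.enumerate_append]
      simp
    have hhead : ((PySem.List.enumerate (pre ++ x :: rest) 0).filter
        (fun q => decide (((pre.length : Int)) < q.1 ∧ x.2 ≠ [] ∧ q.2.2 ≠ []))).map
        (fun q => pvConn x.1 q.2.1)
        = if x.2 ≠ [] then (rest.filter (fun y => y.2 ≠ [])).map (fun y => pvConn x.1 y.1) else [] := by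
      by_cases hx : x.2 = []
      · simp [hx]
      · rw [hfull, List.filter_append, List.map_append,
           pv_filter_lo (pre.length) x.2 (pre ++ [x]) 0 (by simp),
           pv_filter_hi (pre.length) x.2 rest ((pre ++ [x]).length) (by simp),
           pv_filter_map x.2 hx x.1 rest ((pre ++ [x]).length)]
        simp [hx]
    have htail : (PySem.List.enumerate rest ((pre.length : Int) + 1)).flatMap (fun p =>
        ((PySem.List.enumerate (pre ++ x :: rest) 0).filter
          (fun q => decide (p.1 < q.1 ∧ p.2.2 ≠ [] ∧ q.2.2 ≠ []))).map
          (fun q => pvConn p.2.1 q.2.1))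
        = pvPairs ((rest.filter (fun y => y.2 ≠ [])).map Prod.fst) := by
      have h1 : ((pre ++ [x]).length : Int) = (pre.length : Int) + 1 := by simp
      have h2 := ih (pre ++ [x])
      rw [h1] at h2
      rw [hsplit]
      exact h2
    rw [hhead, htail]
    by_cases hx : x.2 = []
    · simp [hx]
    · simp [pvPairs, hx, List.map_map, Function.comp_def]

-- ===== VERDICT (by name: the statement is the Claim_ definition above) =====
theorem creer_connexions_aelya_internes_py_spec : Claim_equal_creer_connexions_aelya_internes_py := by
  intro groupes _
  unfold Spec_creer_connexions_aelya_internes_py creer_connexions_aelya_internes_py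
    creer_connexions_aelya_internes_py_alt
  have hinner : ∀ (p : Int × String × List String) (acc : List (List (String × String))),
      (PySem.List.enumerate groupes 0).foldl (fun connexions q =>
        if p.1 < q.1 ∧ p.2.2 ≠ [] ∧ q.2.2 ≠ [] then connexions ++ [pvConn p.2.1 q.2.1]
        else connexions) acc
      = acc ++ ((PySem.List.enumerate groupes 0).filter
          (fun q => decide (p.1 < q.1 ∧ p.2.2 ≠ [] ∧ q.2.2 ≠ []))).map
          (fun q => pvConn p.2.1 q.2.1) := by
    intro p acc
    exact PySem.List.foldl_append_ite _ _ _ _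
  simp only [hinner]
  rw [PySem.List.foldl_append_eq_flatMap]
  have h := pv_main groupes []
  simp only [List.nil_append, List.length_nil, Nat.cast_zero] at h
  rw [h]
  simp
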